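-- pv_equiv track=rewrite | github.com/rururu/CLIPSAdvent | util.py | parse_buf
-- ===== SOURCE A (Python) =====
-- def parse_buf(buf):
--     prn = []
--     image = None
--     audio = None
--     video = None
--     for e in buf.split('crlf'):
--         if e.startswith('image'):
--             image = e.split()[1].replace('"', '')
--         elif e.startswith('audio'):
--             audio = e.split()[1].replace('"', '')
--         elif e.startswith('video'):
--             video = e.split()[1].replace('"', '')
--         else:
--             prn.append(e)
--     prn = '\n'.join(prn)
--     return [prn, image, audio, video]
-- ===== SOURCE B (Python) =====
-- def parse_buf(buf):
--     segs = buf.split('crlf')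
--     prn = '\n'.join(e for e in segs
--                     if not e.startswith(('image', 'audio', 'video')))
--
--     def last_value(tag):
--         for e in reversed(segs):
--             if e.startswith(tag):
--                 return e.split()[1].replace('"', '')
--         return None
--
--     return [prn, last_value('image'), last_value('audio'), last_value('video')]
-- ===== Notes on version B (the rewrite author's own statement) =====
-- stated objective: simpler
-- what changed: Replaces the single four-accumulator classify-loop by a filtering join for the print text plus, per media tag, a reversed-scan-for-first-match (last-match-wins) helper; no mutable accumulators.
import Mathlib
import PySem

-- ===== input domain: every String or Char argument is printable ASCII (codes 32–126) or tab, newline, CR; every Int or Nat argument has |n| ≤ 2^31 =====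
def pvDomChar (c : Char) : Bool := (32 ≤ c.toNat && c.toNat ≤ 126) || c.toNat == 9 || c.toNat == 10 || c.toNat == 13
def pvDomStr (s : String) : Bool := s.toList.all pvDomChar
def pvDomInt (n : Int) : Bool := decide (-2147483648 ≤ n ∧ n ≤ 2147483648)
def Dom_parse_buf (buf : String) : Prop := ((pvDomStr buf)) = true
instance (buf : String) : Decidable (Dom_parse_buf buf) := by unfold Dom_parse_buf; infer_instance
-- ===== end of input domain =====

-- B replaces A's single four-accumulator classify-loop by a filtering join for the
-- print text plus a reversed scan per media tag (objective: simpler decomposition).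

-- ===== PORT A =====
-- e.split()[1].replace('"', '')  (pyGet? is none exactly where Python raises; Pre_ excludes that)
def pvValA (e : String) : String :=
  PySem.Str.replace (((PySem.List.pyGet? (PySem.Str.split₀ e) 1).getD "")) "\"" ""

def parse_buf (buf : String) : List (Option String) :=
  let st := ((PySem.Str.split? buf "crlf").getD []).foldl
    (fun (s : List String × Option String × Option String × Option String) e =>
      if PySem.Str.startswith e "image" then (s.1, some (pvValA e), s.2.2.1, s.2.2.2)
      else if PySem.Str.startswith e "audio" then (s.1, s.2.1, some (pvValA e), s.2.2.2)
      else if PySem.Str.startswith e "video" then (s.1, s.2.1, s.2.2.1, some (pvValA e))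
      else (s.1 ++ [e], s.2.1, s.2.2.1, s.2.2.2))
    ([], none, none, none)
  [some (PySem.Str.join "\n" st.1), st.2.1, st.2.2.1, st.2.2.2]

-- ===== PORT B =====
def pvValB (e : String) : String :=
  PySem.Str.replace (((PySem.List.pyGet? (PySem.Str.split₀ e) 1).getD "")) "\"" ""

def pvIsMedia (e : String) : Bool :=
  PySem.Str.startswith e "image" || PySem.Str.startswith e "audio" || PySem.Str.startswith e "video"

-- 'for e in reversed(segs): if e.startswith(tag): return …; return None'
def pvLastVal (segs : List String) (tag : String) : Option String :=
  match segs.reverse.find? (fun e => PySem.Str.startswith e tag) with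
  | some e => some (pvValB e)
  | none => none

def parse_buf_alt (buf : String) : List (Option String) :=
  let segs := (PySem.Str.split? buf "crlf").getD []
  let prn := PySem.Str.join "\n" (segs.filter (fun e => !pvIsMedia e))
  [some prn, pvLastVal segs "image", pvLastVal segs "audio", pvLastVal segs "video"]

-- ===== PRECONDITION & SPEC =====
-- Pre_ excludes exactly the inputs where Python A raises IndexError: a segment of the
-- separator-split buffer that starts with a media tag but has fewer than two words.
def Pre_parse_buf (buf : String) : Prop :=
  ∀ e ∈ (PySem.Str.split? buf "crlf").getD [],
    (PySem.Str.startswith e "image" || PySem.Str.startswith e "audio" ||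
     PySem.Str.startswith e "video") = true → 2 ≤ (PySem.Str.split₀ e).length
instance (buf : String) : Decidable (Pre_parse_buf buf) := by unfold Pre_parse_buf; infer_instance

def pvWitness_parse_buf : String := "hellocrlfimage \"a.png\"crlfworld"

def Spec_parse_buf (buf : String) (out : List (Option String)) : Prop := out = parse_buf_alt buf
instance (buf : String) (out : List (Option String)) : Decidable (Spec_parse_buf buf out) := by unfold Spec_parse_buf; infer_instance

-- ===== CLAIM (what is proved, stated in full; the proofs are below) =====
def Claim_equal_parse_buf : Prop := ∀ (buf : String), Dom_parse_buf buf → Pre_parse_buf buf → Spec_parse_buf buf (parse_buf buf)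

-- ===== LEMMAS AND PROOFS =====

-- two distinct same-length tags cannot both be prefixes of e
theorem pv_excl (e t1 t2 : String) (hlen : t1.toList.length = t2.toList.length)
    (hne : t1.toList ≠ t2.toList) (h1 : PySem.Str.startswith e t1 = true) :
    PySem.Str.startswith e t2 = false := by
  by_contra h
  rw [Bool.not_eq_false, PySem.Str.startswith_eq, PySem.Chars.startswith_iff] at h
  rw [PySem.Str.startswith_eq, PySem.Chars.startswith_iff] at h1
  exact hne (List.IsPrefix.eq_of_length
    (List.prefix_of_prefix_length_le h1 h (le_of_eq hlen)) hlen)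

-- the last-match update that pvLastVal computes, seeded with an arbitrary previous value
def pvUpd (l : List String) (tag : String) (x : Option String) : Option String :=
  match l.reverse.find? (fun e => PySem.Str.startswith e tag) with
  | some e => some (pvValA e)
  | none => x

theorem pvUpd_cons (l : List String) (e tag : String) (x : Option String) :
    pvUpd (e :: l) tag x =
      pvUpd l tag (if PySem.Str.startswith e tag then some (pvValA e) else x) := by
  unfold pvUpd
  rw [List.reverse_cons, List.find?_append]
  cases h : l.reverse.find? (fun e => PySem.Str.startswith e tag) with
  | some v => simp
  | none =>
    simp only [Option.none_or, List.find?_cons, List.find?_nil]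
    split_ifs with hp <;> rw [PySem.Str.startswith_eq] at hp <;> simp [hp]

-- the invariant of A's loop
theorem pv_loopA (l : List String) (p : List String) (i a v : Option String) :
    l.foldl
      (fun (s : List String × Option String × Option String × Option String) e =>
        if PySem.Str.startswith e "image" then (s.1, some (pvValA e), s.2.2.1, s.2.2.2)
        else if PySem.Str.startswith e "audio" then (s.1, s.2.1, some (pvValA e), s.2.2.2)
        else if PySem.Str.startswith e "video" then (s.1, s.2.1, s.2.2.1, some (pvValA e))
        else (s.1 ++ [e], s.2.1, s.2.2.1, s.2.2.2))
      (p, i, a, v)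
    = (p ++ l.filter (fun e => !pvIsMedia e),
       pvUpd l "image" i, pvUpd l "audio" a, pvUpd l "video" v) := by
  induction l generalizing p i a v with
  | nil => simp [pvUpd]
  | cons e t ih =>
    rw [List.foldl_cons]
    by_cases hi : PySem.Str.startswith e "image" = true
    · have ha := pv_excl e "image" "audio" (by decide) (by decide) hi
      have hv := pv_excl e "image" "video" (by decide) (by decide) hi
      simp [ih, pvUpd_cons, pvIsMedia, hi, ha, hv, -PySem.Str.startswith_eq]
    · by_cases ha : PySem.Str.startswith e "audio" = true
      · have hv := pv_excl e "audio" "video" (by decide) (by decide) ha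
        simp [ih, pvUpd_cons, pvIsMedia, hi, ha, hv, -PySem.Str.startswith_eq]
      · by_cases hv : PySem.Str.startswith e "video" = true
        · simp [ih, pvUpd_cons, pvIsMedia, hi, ha, hv, -PySem.Str.startswith_eq]
        · simp [ih, pvUpd_cons, pvIsMedia, hi, ha, hv, -PySem.Str.startswith_eq]

theorem pvLastVal_eq_upd (l : List String) (tag : String) :
    pvLastVal l tag = pvUpd l tag none := by
  unfold pvLastVal pvUpd
  cases l.reverse.find? (fun e => PySem.Str.startswith e tag) <;> rfl

-- ===== VERDICT (by name: the statement is the Claim_ definition above) =====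
theorem parse_buf_spec : Claim_equal_parse_buf := by
  intro buf _ _
  unfold Spec_parse_buf parse_buf parse_buf_alt
  rw [pv_loopA]
  simp [pvLastVal_eq_upd]
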